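-- pv_equiv track=rewrite | github.com/MorningStar0709/ppt-master-enhanced | skills/ppt-master-enhanced/scripts/review_utils.py | _pages_by_priority
-- ===== SOURCE A (Python) =====
-- def _pages_by_priority(pages: list[dict]) -> dict[str, list[str]]:
--     """Group page names by priority."""
--     grouped = {"P0": [], "P1": [], "P2": []}
--     for page in pages:
--         priority = page.get("priority", "")
--         file_name = page.get("file", "")
--         if priority in grouped and file_name:
--             grouped[priority].append(file_name)
--     for priority in grouped:
--         grouped[priority].sort()
--     return grouped
-- ===== SOURCE B (Python) =====
-- def _pages_by_priority(pages: list[dict]) -> dict[str, list[str]]: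
--     """Group page names by priority."""
--     ordered = sorted(pages, key=lambda p: p.get("file", ""))
--     return {
--         pr: [p.get("file", "") for p in ordered
--              if p.get("priority", "") == pr and p.get("file", "")]
--         for pr in ("P0", "P1", "P2")
--     }
-- ===== Notes on version B (the rewrite author's own statement) =====
-- stated objective: alternative
-- what changed: B replaces A's mutate-a-dict fold plus three per-bucket in-place sorts by one global sort of the pages by filename followed by a pure filter/map comprehension per priority (buckets come out already sorted); B also does not mutate any dict in place.
import Mathlib
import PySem

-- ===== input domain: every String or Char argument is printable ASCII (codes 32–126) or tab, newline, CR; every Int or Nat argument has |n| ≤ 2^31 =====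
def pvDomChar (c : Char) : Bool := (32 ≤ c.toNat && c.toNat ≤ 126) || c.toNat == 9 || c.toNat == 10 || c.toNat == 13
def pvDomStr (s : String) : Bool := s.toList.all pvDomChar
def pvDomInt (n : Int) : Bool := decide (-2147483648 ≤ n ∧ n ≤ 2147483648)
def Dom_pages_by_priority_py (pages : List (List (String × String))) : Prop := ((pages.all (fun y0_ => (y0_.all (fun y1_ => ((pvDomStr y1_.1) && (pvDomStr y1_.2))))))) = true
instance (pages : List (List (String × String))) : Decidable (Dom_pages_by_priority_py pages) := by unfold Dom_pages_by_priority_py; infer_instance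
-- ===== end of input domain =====

-- B changes the decomposition: one global sort by filename then pure per-priority filter/map, instead of A's dict-mutating fold plus per-bucket sorts (alternative, not faster).

-- page.get(key, "") on the page dict (first-match association-list lookup, like Python dict built from the pairs)
def pvGetS (page : List (String × String)) (key : String) : String :=
  (PySem.Dict.mk page).getD key ""

-- ===== PORT A =====
def pages_by_priority_py (pages : List (List (String × String))) : List (String × List String) :=
  let grouped : PySem.Dict String (List String) :=
    PySem.Dict.mk [("P0", []), ("P1", []), ("P2", [])]
  let grouped := pages.foldl (fun g page =>
    let priority := pvGetS page "priority"
    let file_name := pvGetS page "file"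
    if g.contains priority && file_name != "" then
      g.modify priority [] (fun l => l ++ [file_name])
    else g) grouped
  -- second loop: sort each bucket in place, then return the dict (as its items)
  grouped.items.map (fun kv => (kv.1, PySem.List.sorted kv.2 (fun x => x) false))

-- ===== PORT B =====
def pvBucket (ordered : List (List (String × String))) (pr : String) : List String :=
  (ordered.filter (fun p => pvGetS p "priority" == pr && pvGetS p "file" != "")).map
    (fun p => pvGetS p "file")

def pages_by_priority_py_alt (pages : List (List (String × String))) : List (String × List String) :=
  let ordered := PySem.List.sorted pages (fun p => pvGetS p "file") false
  ["P0", "P1", "P2"].map (fun pr => (pr, pvBucket ordered pr))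

-- ===== PRECONDITION & SPEC =====
def Spec_pages_by_priority_py (pages : List (List (String × String))) (out : List (String × List String)) : Prop := out = pages_by_priority_py_alt pages
instance (pages : List (List (String × String))) (out : List (String × List String)) : Decidable (Spec_pages_by_priority_py pages out) := by unfold Spec_pages_by_priority_py; infer_instance

-- ===== CLAIM (what is proved, stated in full; the proofs are below) =====
def Claim_equal_pages_by_priority_py : Prop := ∀ (pages : List (List (String × String))), Dom_pages_by_priority_py pages → Spec_pages_by_priority_py pages (pages_by_priority_py pages)

-- ===== LEMMAS AND PROOFS =====

-- unsorted bucket of A's fold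
def pvBucketU (pages : List (List (String × String))) (pr : String) : List String :=
  (pages.filter (fun p => pvGetS p "priority" == pr && pvGetS p "file" != "")).map
    (fun p => pvGetS p "file")

-- the contribution of one page to bucket pr
def pvHit (p : List (String × String)) (pr : String) : List String :=
  if pvGetS p "priority" == pr && pvGetS p "file" != "" then [pvGetS p "file"] else []

theorem pvBucketU_nil (pr : String) : pvBucketU [] pr = [] := by
  simp [pvBucketU]

theorem pvBucketU_cons (p : List (String × String)) (ps : List (List (String × String)))
    (pr : String) : pvBucketU (p :: ps) pr = pvHit p pr ++ pvBucketU ps pr := by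
  simp only [pvBucketU, pvHit, List.filter_cons]
  split <;> simp

-- one step of A's loop on the literal three-key dict
theorem pvStep_eq (p : List (String × String)) (a b c : List String) :
    (let priority := pvGetS p "priority"
     let file_name := pvGetS p "file"
     let g := PySem.Dict.mk [("P0", a), ("P1", b), ("P2", c)]
     if g.contains priority && file_name != "" then
       g.modify priority [] (fun l => l ++ [file_name])
     else g) =
    PySem.Dict.mk [("P0", a ++ pvHit p "P0"), ("P1", b ++ pvHit p "P1"),
                   ("P2", c ++ pvHit p "P2")] := by
  by_cases hf : pvGetS p "file" = ""
  · simp [hf, pvHit]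
  · by_cases h0 : pvGetS p "priority" = "P0"
    · simp [h0, hf, pvHit, PySem.Dict.contains, PySem.Dict.modify, PySem.Dict.getD,
        PySem.Dict.get?, PySem.Dict.insert]
    · by_cases h1 : pvGetS p "priority" = "P1"
      · simp [h1, hf, pvHit, PySem.Dict.contains, PySem.Dict.modify, PySem.Dict.getD,
          PySem.Dict.get?, PySem.Dict.insert]
      · by_cases h2 : pvGetS p "priority" = "P2"
        · simp [h2, hf, pvHit, PySem.Dict.contains, PySem.Dict.modify, PySem.Dict.getD,
            PySem.Dict.get?, PySem.Dict.insert]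
        · have hc0 : "P0" ≠ pvGetS p "priority" := fun h => h0 h.symm
          have hc1 : "P1" ≠ pvGetS p "priority" := fun h => h1 h.symm
          have hc2 : "P2" ≠ pvGetS p "priority" := fun h => h2 h.symm
          simp [pvHit, PySem.Dict.contains, hc0, hc1, hc2, h0, h1, h2]

-- A's fold invariant on the literal three-key dict
theorem pvFold_inv (pages : List (List (String × String))) (a b c : List String) :
    pages.foldl (fun g page =>
      let priority := pvGetS page "priority"
      let file_name := pvGetS page "file"
      if g.contains priority && file_name != "" then
        g.modify priority [] (fun l => l ++ [file_name])
      else g) (PySem.Dict.mk [("P0", a), ("P1", b), ("P2", c)]) =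
    PySem.Dict.mk [("P0", a ++ pvBucketU pages "P0"),
                   ("P1", b ++ pvBucketU pages "P1"),
                   ("P2", c ++ pvBucketU pages "P2")] := by
  induction pages generalizing a b c with
  | nil => simp [pvBucketU_nil]
  | cons p ps ih =>
    simp only [List.foldl_cons]
    rw [pvStep_eq p a b c, ih, pvBucketU_cons, pvBucketU_cons, pvBucketU_cons,
      List.append_assoc, List.append_assoc, List.append_assoc]

-- B's bucket is a sorted rearrangement of A's unsorted bucket
theorem pvBucket_sorted (pages : List (List (String × String))) (pr : String) :
    PySem.List.sorted (pvBucketU pages pr) (fun x => x) false =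
    pvBucket (PySem.List.sorted pages (fun p => pvGetS p "file") false) pr := by
  apply PySem.List.sorted_id_eq_of_perm_of_pairwise
  · exact ((PySem.List.sorted_perm pages (fun p => pvGetS p "file") false).filter _).map _
  · exact List.pairwise_map.mpr
      ((PySem.List.sorted_pairwise pages (fun p => pvGetS p "file")).filter _)

-- ===== VERDICT (by name: the statement is the Claim_ definition above) =====
theorem pages_by_priority_py_spec : Claim_equal_pages_by_priority_py := by
  intro pages _
  show pages_by_priority_py pages = _
  simp only [pages_by_priority_py, pages_by_priority_py_alt]
  rw [pvFold_inv pages [] [] []]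
  simp [pvBucket_sorted]
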